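-- pv_equiv track=rewrite | github.com/ghwns82/OpenSW_midterm | Triple.py | check
-- ===== SOURCE A (Python) =====
-- def check(my_card):
--     card = sorted(my_card[:])
--     Tcount = 0
--     for i in range(7): # item for else
--         for j in range(7):
--             if card[i][1] == card[j][1]:
--                 Tcount += 1
--             if Tcount == 3:
--                 break
--         if Tcount == 3:
--             return True
--         Tcount = 0
--     else:
--         return False
-- ===== SOURCE B (Python) =====
-- def check(my_card):
--     card = sorted(my_card)
--     counts = {}
--     for i in range(7):
--         r = card[i][1]
--         counts[r] = counts.get(r, 0) + 1
--         if counts[r] == 3: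
--             return True
--     return False
-- ===== Notes on version B (the rewrite author's own statement) =====
-- stated objective: idiomatic
-- what changed: Replaced A's nested 7x7 rescan (re-counting each card's rank against all seven with break/early-return) by a single pass over the sorted cards that builds a rank-frequency dict and returns True as soon as a count reaches 3.
import Mathlib
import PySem

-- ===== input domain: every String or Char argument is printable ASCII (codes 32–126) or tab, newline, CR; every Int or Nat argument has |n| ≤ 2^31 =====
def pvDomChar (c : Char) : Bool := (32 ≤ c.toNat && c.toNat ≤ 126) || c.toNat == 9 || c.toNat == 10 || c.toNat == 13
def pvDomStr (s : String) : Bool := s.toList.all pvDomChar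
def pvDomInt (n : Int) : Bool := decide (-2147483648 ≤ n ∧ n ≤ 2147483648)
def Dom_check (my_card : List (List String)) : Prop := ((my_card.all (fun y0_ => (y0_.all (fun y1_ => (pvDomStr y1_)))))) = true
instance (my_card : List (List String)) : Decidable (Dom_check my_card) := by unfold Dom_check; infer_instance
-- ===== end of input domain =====

-- B replaces A's nested 7×7 rescan by a single pass that builds a rank-frequency dict
-- over the sorted cards and returns as soon as a count reaches 3 (idiomatic; return
-- value only — neither version mutates its argument).

-- ===== PORT A =====
-- card[k][1], total form; where Python A returns, every access is in range
def checkRank (card : List (List String)) (k : Int) : String :=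
  PySem.List.pyGetD (PySem.List.pyGetD card k []) 1 ""

-- inner 'for j in range(7)' loop: counts matches, breaks at Tcount == 3
def checkInner (card : List (List String)) (ri : String) (js : List Int) (t : Int) : Int :=
  match js with
  | [] => t
  | j :: rest =>
    let t' := if ri == checkRank card j then t + 1 else t
    if t' == 3 then t' else checkInner card ri rest t'

-- outer 'for i in range(7)' loop with early 'return True' and the for-else 'return False'
def checkOuter (card : List (List String)) (is : List Int) : Bool :=
  match is with
  | [] => false
  | i :: rest =>
    let t := checkInner card (checkRank card i) (PySem.List.pyRange 0 7 1) 0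
    if t == 3 then true else checkOuter card rest

def check (my_card : List (List String)) : Bool :=
  let card := PySem.List.sorted (PySem.List.slice my_card none none) (fun x => x) false
  checkOuter card (PySem.List.pyRange 0 7 1)

-- ===== PORT B =====
-- 'for i in range(7): r = card[i][1]; counts[r] = counts.get(r, 0) + 1; if counts[r] == 3: return True'
def altLoop (card : List (List String)) (js : List Int) (counts : PySem.Dict String Int) : Bool :=
  match js with
  | [] => false
  | j :: rest =>
    let r := checkRank card j
    let counts' := counts.insert r (counts.getD r 0 + 1)
    if counts'.getD r 0 == 3 then true else altLoop card rest counts'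

def check_alt (my_card : List (List String)) : Bool :=
  altLoop (PySem.List.sorted my_card (fun x => x) false) (PySem.List.pyRange 0 7 1)
    PySem.Dict.empty

-- ===== PRECONDITION & SPEC =====
-- Which inputs A accepts depends on the SORTED order of the cards; String.< is not
-- kernel-reducible, so Pre_ carries its own kernel-reducible copy of Python's stable
-- sort under the code-point order (ASCII domain): pvSortRows xs = sorted(xs).
def pvCharsLt : List Char → List Char → Bool
  | [], [] => false
  | [], _ :: _ => true
  | _ :: _, [] => false
  | c :: cs, d :: ds =>
    if c.toNat < d.toNat then true else if d.toNat < c.toNat then false else pvCharsLt cs ds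

def pvStrLt (a b : String) : Bool := pvCharsLt a.toList b.toList

def pvRowLt : List String → List String → Bool
  | [], [] => false
  | [], _ :: _ => true
  | _ :: _, [] => false
  | a :: as, b :: bs => if pvStrLt a b then true else if pvStrLt b a then false else pvRowLt as bs

def pvInsRow (x : List String) : List (List String) → List (List String)
  | [] => [x]
  | y :: ys => if pvRowLt x y then x :: y :: ys else y :: pvInsRow x ys

def pvSortRows (xs : List (List String)) : List (List String) :=
  xs.foldl (fun acc x => pvInsRow x acc) []

-- Exactly the inputs on which Python A returns: either the full 7×7 scan is in range
-- (at least 7 cards, each of the first 7 sorted cards has a second entry), or the very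
-- first outer iteration finds its third matching rank inside an in-range prefix and A
-- returns True before ever reaching an out-of-range access.
def Pre_check (my_card : List (List String)) : Prop :=
  let card := pvSortRows my_card
  (7 ≤ card.length ∧ ∀ k ∈ List.range 7, 2 ≤ (card.getD k []).length)
  ∨ (∃ J ∈ List.range (min card.length 7), (∀ k ∈ List.range (J + 1), 2 ≤ (card.getD k []).length) ∧
      3 ≤ ((card.take (J + 1)).map (fun c => c.getD 1 "")).count ((card.getD 0 []).getD 1 ""))
instance (my_card : List (List String)) : Decidable (Pre_check my_card) := by
  unfold Pre_check; infer_instance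

def pvWitness_check : List (List String) :=
  [["S", "A"], ["H", "2"], ["D", "3"], ["C", "4"], ["S", "5"], ["H", "6"], ["D", "A"]]

def Spec_check (my_card : List (List String)) (out : Bool) : Prop := out = check_alt my_card
instance (my_card : List (List String)) (out : Bool) : Decidable (Spec_check my_card out) := by
  unfold Spec_check; infer_instance

-- ===== CLAIM (what is proved, stated in full; the proofs are below) =====
def Claim_equal_check : Prop := ∀ (my_card : List (List String)), Dom_check my_card → Pre_check my_card → Spec_check my_card (check my_card)

-- ===== LEMMAS AND PROOFS =====

theorem inner_eq (card : List (List String)) (ri : String) (js : List Int) (t : Int)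
    (ht : 0 ≤ t ∧ t < 3) :
    checkInner card ri js t = min 3 (t + (js.countP (fun j => ri == checkRank card j) : Int)) := by
  induction js generalizing t with
  | nil => simp [checkInner]; omega
  | cons j rest ih =>
    simp only [checkInner, List.countP_cons]
    by_cases h : (ri == checkRank card j) = true
    · simp only [h, if_pos]
      by_cases h3 : t + 1 = 3
      · have hb : (t + 1 == 3) = true := by simp [h3]
        simp only [hb, if_pos]
        have hc : (0 : Int) ≤ (rest.countP (fun j => ri == checkRank card j) : Int) := by positivity
        omega
      · have hb : (t + 1 == 3) = false := by simp [h3]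
        simp only [hb, Bool.false_eq_true, if_false]
        rw [ih (t + 1) (by omega)]
        simp
        omega
    · simp only [h, Bool.false_eq_true, if_false]
      have hb : (t == 3) = false := by simp; omega
      simp only [hb, Bool.false_eq_true, if_false]
      rw [ih t ht]
      simp

theorem outer_eq (card : List (List String)) (is : List Int) :
    checkOuter card is
      = is.any (fun i =>
          3 ≤ ((PySem.List.pyRange 0 7 1).countP (fun j => checkRank card i == checkRank card j) : Int)) := by
  induction is with
  | nil => simp [checkOuter]
  | cons i rest ih =>
    simp only [checkOuter, List.any_cons, ← ih]
    rw [inner_eq card _ _ 0 (by omega)]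
    by_cases h : 3 ≤ ((PySem.List.pyRange 0 7 1).countP (fun j => checkRank card i == checkRank card j) : Int)
    · simp [h]
    · simp [h]

-- B's loop returns true iff the carried counts plus the remaining ranks put some rank at ≥ 3
theorem altLoop_iff (card : List (List String)) (js : List Int) (d : PySem.Dict String Int)
    (hd : ∀ r : String, d.getD r 0 ≤ 2) :
    altLoop card js d = true
      ↔ ∃ r : String, 3 ≤ d.getD r 0 + ((js.map (checkRank card)).count r : Int) := by
  induction js generalizing d with
  | nil =>
    simp only [altLoop, List.map_nil, List.count_nil, Nat.cast_zero, add_zero]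
    constructor
    · intro h; cases h
    · rintro ⟨r, hr⟩; exact absurd hr (by have := hd r; omega)
  | cons j rest ih =>
    simp only [altLoop, List.map_cons]
    rw [PySem.Dict.getD_insert_self]
    by_cases h3 : d.getD (checkRank card j) 0 + 1 = 3
    · have hb : (d.getD (checkRank card j) 0 + 1 == 3) = true := by simp [h3]
      simp only [hb, if_pos]
      constructor
      · intro _
        refine ⟨checkRank card j, ?_⟩
        rw [List.count_cons_self]
        push_cast
        omega
      · intro _; trivial
    · have hb : (d.getD (checkRank card j) 0 + 1 == 3) = false := by simp [h3]
      simp only [hb, Bool.false_eq_true, if_false]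
      rw [ih _ (by
        intro r
        rw [PySem.Dict.getD_insert]
        split_ifs with hr
        · have := hd (checkRank card j); omega
        · exact hd r)]
      constructor
      · rintro ⟨r, hr⟩
        refine ⟨r, ?_⟩
        rw [PySem.Dict.getD_insert] at hr
        by_cases hre : r = checkRank card j
        · rw [hre] at hr ⊢
          rw [if_pos rfl] at hr
          rw [List.count_cons_self]
          push_cast at hr ⊢
          omega
        · rw [List.count_cons_of_ne (Ne.symm hre)]
          simp only [if_neg hre] at hr
          exact hr
      · rintro ⟨r, hr⟩
        refine ⟨r, ?_⟩
        rw [PySem.Dict.getD_insert]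
        by_cases hre : r = checkRank card j
        · rw [hre] at hr ⊢
          rw [List.count_cons_self] at hr
          rw [if_pos rfl]
          push_cast at hr ⊢
          omega
        · rw [List.count_cons_of_ne (Ne.symm hre)] at hr
          simp only [if_neg hre]
          exact hr

-- matching against card[i][1] across j counts occurrences of that rank in the rank list
theorem count_rank_eq (card : List (List String)) (i : Int) :
    List.count (checkRank card i) (List.map (checkRank card) (PySem.List.pyRange 0 7 1))
      = List.countP (fun j => checkRank card i == checkRank card j) (PySem.List.pyRange 0 7 1) := by
  rw [List.count_eq_countP, List.countP_map]
  apply List.countP_congr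
  intro j _
  simp only [Function.comp_apply, beq_iff_eq]
  exact eq_comm

-- ===== VERDICT (by name: the statement is the Claim_ definition above) =====
theorem check_spec : Claim_equal_check := by
  intro my_card _hdom _hpre
  show check my_card = check_alt my_card
  simp only [check, check_alt, PySem.List.slice_none_none]
  set card := PySem.List.sorted my_card (fun x => x) false with hcard
  rw [outer_eq]
  apply Bool.eq_iff_iff.mpr
  rw [List.any_eq_true,
      altLoop_iff card (PySem.List.pyRange 0 7 1) PySem.Dict.empty
        (by intro r; rw [PySem.Dict.getD_empty]; omega)]
  constructor
  · rintro ⟨i, _hi, h⟩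
    simp only [decide_eq_true_eq] at h
    refine ⟨checkRank card i, ?_⟩
    rw [PySem.Dict.getD_empty, count_rank_eq]
    omega
  · rintro ⟨r, hr⟩
    rw [PySem.Dict.getD_empty] at hr
    have hpos : 0 < (List.map (checkRank card) (PySem.List.pyRange 0 7 1)).count r := by
      by_contra h
      omega
    have hmem : r ∈ List.map (checkRank card) (PySem.List.pyRange 0 7 1) :=
      List.count_pos_iff.mp hpos
    obtain ⟨i, hi, hri⟩ := List.mem_map.mp hmem
    refine ⟨i, hi, ?_⟩
    simp only [decide_eq_true_eq]
    rw [← hri, count_rank_eq] at hr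
    omega
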